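-- pv_equiv track=rewrite | github.com/alonaharoni1/IntroEx11 | ex11_utils.py | is_path_legal
-- ===== SOURCE A (Python) =====
-- from typing import List, Tuple, Iterable, Optional
--
-- Board = List[List[str]]
--
-- Path = List[Tuple[int, int]]
--
-- def is_path_legal(path: Path, board: Board):
--     """checks if a path is within the board boundaries and if every element of
--     the path is linked to the last element"""
--     location = path[0]
--     last_y = location[0]
--     last_x = location[1]
--     height = len(board)
--     width = len(board[0])
--     for location in path[1:]:
--         y = location[0]
--         x = location[1]
--         if y >= height or y < 0 or x >= width or x < 0:
--             return False
--         if abs(y - last_y) > 1 or abs(x - last_x) > 1 or \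
--                 (y == last_y and x == last_x):
--             return False
--         last_y = y
--         last_x = x
--     return True
-- ===== SOURCE B (Python) =====
-- def is_path_legal(path, board):
--     """checks if a path is within the board boundaries and if every element of
--     the path is linked to the last element"""
--     height = len(board)
--     width = len(board[0])
--     in_bounds = all(0 <= y < height and 0 <= x < width for (y, x) in path[1:])
--     adjacent = all(max(abs(a[0] - b[0]), abs(a[1] - b[1])) == 1
--                    for a, b in zip(path, path[1:]))
--     return in_bounds and adjacent
-- ===== Notes on version B (the rewrite author's own statement) =====
-- stated objective: simpler
-- what changed: Replaced the single fused loop with early returns and carried last_y/last_x state by two stateless all()-passes: a bounds scan over path[1:] and a Chebyshev-distance==1 scan over zip(path, path[1:]).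
import Mathlib
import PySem

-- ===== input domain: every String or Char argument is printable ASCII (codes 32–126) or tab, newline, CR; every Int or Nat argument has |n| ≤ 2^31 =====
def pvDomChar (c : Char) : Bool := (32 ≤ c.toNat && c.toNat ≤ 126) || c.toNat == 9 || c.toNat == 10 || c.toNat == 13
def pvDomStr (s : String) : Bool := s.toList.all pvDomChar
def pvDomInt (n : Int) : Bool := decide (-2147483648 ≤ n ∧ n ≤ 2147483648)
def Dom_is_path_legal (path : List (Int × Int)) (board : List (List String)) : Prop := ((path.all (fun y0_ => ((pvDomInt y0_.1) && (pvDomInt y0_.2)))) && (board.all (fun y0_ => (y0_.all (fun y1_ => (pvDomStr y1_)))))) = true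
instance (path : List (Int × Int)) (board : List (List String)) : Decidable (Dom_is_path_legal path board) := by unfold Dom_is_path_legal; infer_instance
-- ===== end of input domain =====

-- B splits A's fused stateful loop into two independent stateless all()-passes (simpler decomposition, same O(n) cost); equivalence proved on nonempty path and board (A raises IndexError otherwise).

-- ===== PORT A =====
-- the for-loop of A with its carried state (last_y, last_x) and early returns
def isPathLegalLoop (rest : List (Int × Int)) (last_y last_x : Int) (height width : Int) : Bool :=
  match rest with
  | [] => true
  | (y, x) :: rs =>
    if y ≥ height ∨ y < 0 ∨ x ≥ width ∨ x < 0 then false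
    else if (y - last_y).natAbs > 1 ∨ (x - last_x).natAbs > 1 ∨ (y = last_y ∧ x = last_x) then false
    else isPathLegalLoop rs y x height width

def is_path_legal (path : List (Int × Int)) (board : List (List String)) : Bool :=
  match path, board with
  | [], _ => false            -- path[0]: Python raises IndexError here; excluded by Pre_
  | _, [] => false            -- board[0]: Python raises IndexError here; excluded by Pre_
  | (ly, lx) :: rest, row :: brs =>
    isPathLegalLoop rest ly lx ((row :: brs).length : Int) (row.length : Int)

-- ===== PORT B =====
def is_path_legal_alt (path : List (Int × Int)) (board : List (List String)) : Bool :=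
  let height : Int := board.length
  let width : Int := (board.headD []).length   -- board[0]: Python raises on empty board; excluded by Pre_
  let in_bounds := (path.drop 1).all (fun p => decide (0 ≤ p.1 ∧ p.1 < height ∧ 0 ≤ p.2 ∧ p.2 < width))
  let adjacent := (path.zip (path.drop 1)).all
      (fun ab => decide (max (ab.1.1 - ab.2.1).natAbs (ab.1.2 - ab.2.2).natAbs = 1))
  in_bounds && adjacent

-- ===== PRECONDITION & SPEC =====
-- A raises IndexError on an empty path (path[0]) or an empty board (board[0]); exactly those inputs are excluded.
def Pre_is_path_legal (path : List (Int × Int)) (board : List (List String)) : Prop :=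
  path ≠ [] ∧ board ≠ []
instance (path : List (Int × Int)) (board : List (List String)) : Decidable (Pre_is_path_legal path board) := by unfold Pre_is_path_legal; infer_instance

def pvWitness_is_path_legal : (List (Int × Int)) × List (List String) :=
  ([(0, 0), (0, 1)], [["a", "b"], ["c", "d"]])

def Spec_is_path_legal (path : List (Int × Int)) (board : List (List String)) (out : Bool) : Prop := out = is_path_legal_alt path board
instance (path : List (Int × Int)) (board : List (List String)) (out : Bool) : Decidable (Spec_is_path_legal path board out) := by unfold Spec_is_path_legal; infer_instance

-- ===== CLAIM (what is proved, stated in full; the proofs are below) =====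
def Claim_equal_is_path_legal : Prop := ∀ (path : List (Int × Int)) (board : List (List String)), Dom_is_path_legal path board → Pre_is_path_legal path board → Spec_is_path_legal path board (is_path_legal path board)

-- ===== LEMMAS AND PROOFS =====
-- A's loop from state (ly, lx) equals B's two passes over ((ly,lx)::rest)
theorem loop_eq_passes (rest : List (Int × Int)) (ly lx H W : Int) :
    isPathLegalLoop rest ly lx H W =
      ((rest.all (fun p => decide (0 ≤ p.1 ∧ p.1 < H ∧ 0 ≤ p.2 ∧ p.2 < W))) &&
       ((((ly, lx) :: rest).zip rest).all
          (fun ab => decide (max (ab.1.1 - ab.2.1).natAbs (ab.1.2 - ab.2.2).natAbs = 1)))) := by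
  induction rest generalizing ly lx with
  | nil => simp [isPathLegalLoop]
  | cons hd rs ih =>
    obtain ⟨y, x⟩ := hd
    simp only [isPathLegalLoop, List.zip_cons_cons, List.all_cons]
    by_cases hb : y ≥ H ∨ y < 0 ∨ x ≥ W ∨ x < 0
    · rw [if_pos hb]
      have : ¬ (0 ≤ y ∧ y < H ∧ 0 ≤ x ∧ x < W) := by omega
      simp [this]
    · rw [if_neg hb]
      by_cases ha : (y - ly).natAbs > 1 ∨ (x - lx).natAbs > 1 ∨ (y = ly ∧ x = lx)
      · rw [if_pos ha]
        have : ¬ (max (ly - y).natAbs (lx - x).natAbs = 1) := by omega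
        simp [this]
      · rw [if_neg ha]
        have hadj : max (ly - y).natAbs (lx - x).natAbs = 1 := by omega
        have hbnd : (0 ≤ y ∧ y < H ∧ 0 ≤ x ∧ x < W) := by omega
        simp [hadj, hbnd, ih]

-- ===== VERDICT (by name: the statement is the Claim_ definition above) =====
theorem is_path_legal_spec : Claim_equal_is_path_legal := by
  intro path board _ hpre
  obtain ⟨hp, hb⟩ := hpre
  match path, board with
  | (ly, lx) :: rest, row :: brs =>
    show is_path_legal _ _ = is_path_legal_alt _ _
    simp only [is_path_legal, is_path_legal_alt, List.headD, List.drop_one, List.tail]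
    exact loop_eq_passes rest ly lx _ _
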